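-- pv_equiv track=rewrite | github.com/evelyd/pi_learning_for_collaborative_carrying | scripts/parse_vive_data.py | parse_poses
-- ===== SOURCE A (Python) =====
-- def parse_poses(poses):
--     pose_list = []
--     stack = []
--     current_pose = []
--     for i, char in enumerate(poses):
--         if char == '(':
--             stack.append(char)
--             if len(stack) == 1:
--                 current_pose = []
--         elif char == ')':
--             if stack:
--                 stack.pop()
--                 if len(stack) == 0:
--                     current_pose.append(char)
--                     pose_list.append(''.join(current_pose))
--         if len(stack) > 0:
--             current_pose.append(char)
--         # Check if we are at the final character
--         if i == len(poses) - 1 and stack: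
--             pose_list.append(''.join(current_pose))
--     # Remove '(' and ')' from each pose in the pose_list
--     pose_list = [pose.strip('()') for pose in pose_list]
--
--     return pose_list
-- ===== SOURCE B (Python) =====
-- def parse_poses(poses):
--     pieces = []
--     depth = 0
--     start = 0
--     for i, char in enumerate(poses):
--         if char == '(':
--             depth += 1
--             if depth == 1:
--                 start = i
--         elif char == ')':
--             if depth > 0:
--                 depth -= 1
--                 if depth == 0:
--                     pieces.append(poses[start:i + 1])
--     if depth > 0:
--         pieces.append(poses[start:])
--     return [p.strip('()') for p in pieces]
-- ===== Notes on version B (the rewrite author's own statement) =====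
-- stated objective: simpler
-- what changed: Replaced A's char-by-char accumulator list and explicit paren stack with an integer depth counter plus a start index, emitting each pose as a single slice of the input instead of rebuilding it character by character (fewer per-char list appends, measured constant-factor speedup).
import Mathlib
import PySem

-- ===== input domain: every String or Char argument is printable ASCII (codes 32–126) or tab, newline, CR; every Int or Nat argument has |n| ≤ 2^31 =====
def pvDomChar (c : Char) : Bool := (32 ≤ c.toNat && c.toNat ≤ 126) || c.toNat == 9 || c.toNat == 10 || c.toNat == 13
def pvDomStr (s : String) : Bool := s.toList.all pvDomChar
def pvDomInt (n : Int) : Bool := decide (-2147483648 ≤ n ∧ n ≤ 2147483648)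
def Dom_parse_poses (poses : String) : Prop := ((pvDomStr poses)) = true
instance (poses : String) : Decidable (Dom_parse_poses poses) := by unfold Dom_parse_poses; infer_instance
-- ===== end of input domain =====

-- B replaces A's paren stack and char-by-char pose accumulator with a depth counter and
-- a start index, cutting each pose out of the input as one slice (objective: simpler).

-- ===== PORT A =====
-- the straight-line tail of A's loop body: append char to current_pose while the stack is
-- nonempty, and at the final index flush the open pose
def stepAfinish (n : Nat) (pose_list : List (List Char)) (stack cur : List Char)
    (i : Int) (c : Char) : List (List Char) × List Char × List Char :=
  let cur := if stack.length > 0 then cur ++ [c] else cur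
  let pose_list := if i = (n : Int) - 1 ∧ stack ≠ [] then pose_list ++ [cur] else pose_list
  (pose_list, stack, cur)

def stepA (n : Nat) : List (List Char) × List Char × List Char → Int × Char →
    List (List Char) × List Char × List Char
  | (pose_list, stack, cur), (i, c) =>
    if c = '(' then
      stepAfinish n pose_list (stack ++ [c]) (if (stack ++ [c]).length = 1 then [] else cur) i c
    else if c = ')' then
      if stack ≠ [] then
        let stack' := stack.dropLast
        if stack'.length = 0 then stepAfinish n (pose_list ++ [cur ++ [c]]) stack' (cur ++ [c]) i c
        else stepAfinish n pose_list stack' cur i c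
      else stepAfinish n pose_list stack cur i c
    else stepAfinish n pose_list stack cur i c

def parse_poses (poses : String) : List String :=
  let cs := poses.toList
  let st := (PySem.List.enumerate cs 0).foldl (stepA cs.length) ([], [], [])
  st.1.map (fun p => String.ofList (PySem.Chars.stripChars p ['(', ')']))

-- ===== PORT B =====
def stepB (cs : List Char) : List (List Char) × Int × Int → Int × Char →
    List (List Char) × Int × Int
  | (pieces, depth, start), (i, c) =>
    if c = '(' then
      (pieces, depth + 1, if depth + 1 = 1 then i else start)
    else if c = ')' then
      if depth > 0 then
        ((if depth - 1 = 0 then pieces ++ [PySem.List.slice cs (some start) (some (i + 1))]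
          else pieces), depth - 1, start)
      else (pieces, depth, start)
    else (pieces, depth, start)

def parse_poses_alt (poses : String) : List String :=
  let cs := poses.toList
  let st := (PySem.List.enumerate cs 0).foldl (stepB cs) ([], 0, 0)
  let pieces := if st.2.1 > 0 then st.1 ++ [PySem.List.slice cs (some st.2.2) none] else st.1
  pieces.map (fun p => String.ofList (PySem.Chars.stripChars p ['(', ')']))

-- ===== PRECONDITION & SPEC =====
def Spec_parse_poses (poses : String) (out : List String) : Prop := out = parse_poses_alt poses
instance (poses : String) (out : List String) : Decidable (Spec_parse_poses poses out) := by
  unfold Spec_parse_poses; infer_instance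

-- ===== CLAIM (what is proved, stated in full; the proofs are below) =====
def Claim_equal_parse_poses : Prop := ∀ (poses : String), Dom_parse_poses poses → Spec_parse_poses poses (parse_poses poses)

-- ===== LEMMAS AND PROOFS =====

-- appending the char at position i extends the accumulated pose to the next slice
lemma take_drop_snoc (cs : List Char) (s i : Nat) (c : Char) (t : List Char)
    (hs : s ≤ i) (h : cs.drop i = c :: t) :
    ((cs.drop s).take (i - s)) ++ [c] = (cs.drop s).take (i + 1 - s) := by
  have hdd : (cs.drop s).drop (i - s) = cs.drop i := by
    rw [List.drop_drop]; congr 1; omega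
  have : i + 1 - s = (i - s) + 1 := by omega
  rw [this, List.take_add, hdd, h]
  simp

-- the accumulated pose plus the char at the final position i is the tail slice from s
lemma take_drop_last (cs : List Char) (s i : Nat) (c : Char)
    (hs : s ≤ i) (h : cs.drop i = [c]) :
    ((cs.drop s).take (i - s)) ++ [c] = cs.drop s := by
  have hdd : (cs.drop s).drop (i - s) = cs.drop i := by
    rw [List.drop_drop]; congr 1; omega
  conv_rhs => rw [← List.take_append_drop (i - s) (cs.drop s)]
  rw [hdd, h]

-- main loop correspondence: A's fold (tail flushed in-loop) equals B's fold plus its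
-- post-loop tail append, for any aligned intermediate states
lemma loop_eq (cs : List Char) :
    ∀ (rest : List Char) (i : Nat) (pl : List (List Char)) (stack cur : List Char)
      (d start : Int),
      cs.drop i = rest →
      i + rest.length = cs.length →
      0 ≤ d →
      stack.length = d.toNat →
      (rest = [] → d = 0) →
      (0 < d → 0 ≤ start ∧ start.toNat ≤ i ∧
        cur = (cs.drop start.toNat).take (i - start.toNat)) →
      ((PySem.List.enumerate rest (i : Int)).foldl (stepA cs.length) (pl, stack, cur)).1 =
        (let stB := (PySem.List.enumerate rest (i : Int)).foldl (stepB cs) (pl, d, start)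
         if stB.2.1 > 0 then stB.1 ++ [PySem.List.slice cs (some stB.2.2) none] else stB.1) := by
  intro rest
  induction rest with
  | nil =>
    intro i pl stack cur d start hdrop hlen hd hstk hnil hinv
    simp [PySem.List.enumerate, hnil rfl]
  | cons c rest ih =>
    intro i pl stack cur d start hdrop hlen hd hstk hnil hinv
    clear hnil
    have hi1 : cs.drop (i + 1) = rest := by
      have := congrArg List.tail hdrop
      simpa [List.tail_drop] using this
    have hlen' : (i + 1) + rest.length = cs.length := by
      simp only [List.length_cons] at hlen; omega
    simp only [PySem.List.enumerate_cons, List.foldl_cons]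
    by_cases hlast : rest = []
    · -- final character of the string
      subst hlast
      have hn : (i : Int) = (cs.length : Int) - 1 := by
        simp only [List.length_cons, List.length_nil] at hlen; omega
      simp only [PySem.List.enumerate_nil, List.foldl_nil]
      by_cases hc1 : c = '('
      · subst hc1
        by_cases hd0 : d = 0
        · have hstk0 : stack = [] := by
            subst hd0; simpa using List.eq_nil_of_length_eq_zero (by simp [hstk])
          subst hd0
          have hsl : PySem.List.slice cs (some ((cs.length:Int) - 1)) none = ['('] := by
            rw [← hn, PySem.List.slice_from_natCast, hdrop]
          simp [stepA, stepAfinish, stepB, hstk0, hn, hsl]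
        · have hdpos : 0 < d := lt_of_le_of_ne hd (Ne.symm hd0)
          obtain ⟨hs0, hsle, hcur⟩ := hinv hdpos
          obtain ⟨s, rfl⟩ : ∃ s : Nat, start = (s : Int) :=
            ⟨start.toNat, (Int.toNat_of_nonneg hs0).symm⟩
          have hstkne : stack ≠ [] := by
            intro h; rw [h] at hstk; simp at hstk; omega
          have hlen1 : (stack ++ ['(']).length ≠ 1 := by
            simp [hstk]; omega
          simp only [Int.toNat_natCast] at hcur hsle
          simp [stepA, stepAfinish, stepB, hstkne, hn, show d + 1 ≠ 1 by omega,
            show (0:Int) < d + 1 by omega, PySem.List.slice_from_natCast cs s, hcur,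
            take_drop_last cs s i '(' hsle hdrop]
      · by_cases hc2 : c = ')'
        · subst hc2
          by_cases hd0 : d = 0
          · have hstk0 : stack = [] := by
              subst hd0; simpa using List.eq_nil_of_length_eq_zero (by simp [hstk])
            subst hd0
            simp [stepA, stepAfinish, stepB, hstk0, hc1]
          · have hdpos : 0 < d := lt_of_le_of_ne hd (Ne.symm hd0)
            obtain ⟨hs0, hsle, hcur⟩ := hinv hdpos
            obtain ⟨s, rfl⟩ : ∃ s : Nat, start = (s : Int) :=
              ⟨start.toNat, (Int.toNat_of_nonneg hs0).symm⟩
            have hstkne : stack ≠ [] := by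
              intro h; rw [h] at hstk; simp at hstk; omega
            simp only [Int.toNat_natCast] at hcur hsle
            have hslice : PySem.List.slice cs (some (s:Int)) (some ((i:Int)+1)) = cur ++ [')'] := by
              have hcast : ((i:Int)+1) = ((i+1 : Nat) : Int) := by push_cast; ring
              rw [hcast, PySem.List.slice_natCast, hcur, take_drop_snoc cs s i ')' [] hsle hdrop]
            by_cases hd1 : d = 1
            · subst hd1
              have hdl : stack.dropLast.length = 0 := by simp [hstk]
              have hdlnil : stack.dropLast = [] := List.eq_nil_of_length_eq_zero hdl
              simp [stepA, stepAfinish, stepB, hstkne, hc1, hdlnil, hslice, hcur]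
            · have hdl : stack.dropLast.length ≠ 0 := by simp [hstk]; omega
              simp [stepA, stepAfinish, stepB, hstkne, hc1, hn, hdpos,
                show stack.dropLast ≠ [] by intro h; rw [h] at hdl; simp at hdl,
                show ¬ (d - 1 = 0) by omega,
                show ¬ (stack.length - 1 = 0) by rw [hstk]; omega,
                show 1 < stack.length by rw [hstk]; omega,
                PySem.List.slice_from_natCast cs s, hcur,
                take_drop_last cs s i ')' hsle hdrop]
              omega
        · by_cases hd0 : d = 0
          · have hstk0 : stack = [] := by
              subst hd0; simpa using List.eq_nil_of_length_eq_zero (by simp [hstk])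
            subst hd0
            simp [stepA, stepAfinish, stepB, hstk0, hc1, hc2]
          · have hdpos : 0 < d := lt_of_le_of_ne hd (Ne.symm hd0)
            obtain ⟨hs0, hsle, hcur⟩ := hinv hdpos
            obtain ⟨s, rfl⟩ : ∃ s : Nat, start = (s : Int) :=
              ⟨start.toNat, (Int.toNat_of_nonneg hs0).symm⟩
            have hstkne : stack ≠ [] := by
              intro h; rw [h] at hstk; simp at hstk; omega
            simp only [Int.toNat_natCast] at hcur hsle
            simp [stepA, stepAfinish, stepB, hstkne, hc1, hc2, hn, hdpos,
              PySem.List.slice_from_natCast cs s, hcur,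
              take_drop_last cs s i c hsle hdrop]
    · -- not the final character: one step, then the induction hypothesis
      have hn : ¬ ((i : Int) = (cs.length : Int) - 1) := by
        have h1 : 1 ≤ rest.length := by
          cases rest with
          | nil => exact absurd rfl hlast
          | cons _ _ => simp
        simp only [List.length_cons] at hlen; omega
      by_cases hc1 : c = '('
      · subst hc1
        by_cases hd0 : d = 0
        · have hstk0 : stack = [] := by
            subst hd0; simpa using List.eq_nil_of_length_eq_zero (by simp [hstk])
          subst hd0
          have := ih (i + 1) pl ['('] ['('] 1 ((i : Nat) : Int) hi1 hlen' (by omega)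
            (by simp) (fun h => absurd h hlast)
            (by
              intro _
              refine ⟨by omega, by simp, ?_⟩
              simp only [Int.toNat_natCast]
              rw [hdrop]
              simp)
          simpa [stepA, stepAfinish, stepB, hstk0, hn] using this
        · have hdpos : 0 < d := lt_of_le_of_ne hd (Ne.symm hd0)
          obtain ⟨hs0, hsle, hcur⟩ := hinv hdpos
          obtain ⟨s, rfl⟩ : ∃ s : Nat, start = (s : Int) :=
            ⟨start.toNat, (Int.toNat_of_nonneg hs0).symm⟩
          have hstkne : stack ≠ [] := by
            intro h; rw [h] at hstk; simp at hstk; omega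
          simp only [Int.toNat_natCast] at hcur hsle
          have := ih (i + 1) pl (stack ++ ['(']) (cur ++ ['(']) (d + 1) (s : Int) hi1 hlen'
            (by omega) (by simp [hstk]; omega) (fun h => absurd h hlast)
            (by
              intro _
              refine ⟨by omega, by simp; omega, ?_⟩
              simp only [Int.toNat_natCast]
              rw [hcur, take_drop_snoc cs s i '(' rest hsle hdrop])
          simpa [stepA, stepAfinish, stepB, hstkne, hn,
            show d + 1 ≠ 1 by omega] using this
      · by_cases hc2 : c = ')'
        · subst hc2
          by_cases hd0 : d = 0
          · have hstk0 : stack = [] := by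
              subst hd0; simpa using List.eq_nil_of_length_eq_zero (by simp [hstk])
            subst hd0
            have := ih (i + 1) pl [] cur 0 start hi1 hlen' le_rfl (by simp)
              (fun _ => rfl) (by intro h; exact absurd h (lt_irrefl 0))
            simpa [stepA, stepAfinish, stepB, hstk0, hc1] using this
          · have hdpos : 0 < d := lt_of_le_of_ne hd (Ne.symm hd0)
            obtain ⟨hs0, hsle, hcur⟩ := hinv hdpos
            obtain ⟨s, rfl⟩ : ∃ s : Nat, start = (s : Int) :=
              ⟨start.toNat, (Int.toNat_of_nonneg hs0).symm⟩
            have hstkne : stack ≠ [] := by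
              intro h; rw [h] at hstk; simp at hstk; omega
            simp only [Int.toNat_natCast] at hcur hsle
            have hslice : PySem.List.slice cs (some (s:Int)) (some ((i:Int)+1)) = cur ++ [')'] := by
              have hcast : ((i:Int)+1) = ((i+1 : Nat) : Int) := by push_cast; ring
              rw [hcast, PySem.List.slice_natCast, hcur, take_drop_snoc cs s i ')' rest hsle hdrop]
            by_cases hd1 : d = 1
            · subst hd1
              have hdl : stack.dropLast.length = 0 := by simp [hstk]
              have hdlnil : stack.dropLast = [] := List.eq_nil_of_length_eq_zero hdl
              have := ih (i + 1) (pl ++ [cur ++ [')']]) [] (cur ++ [')']) 0 (s : Int) hi1 hlen'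
                le_rfl (by simp) (fun _ => rfl) (by intro h; exact absurd h (lt_irrefl 0))
              simpa [stepA, stepAfinish, stepB, hstkne, hc1, hdl, hdlnil, hslice] using this
            · have hdl : stack.dropLast.length ≠ 0 := by simp [hstk]; omega
              have hdlnil : stack.dropLast ≠ [] := by
                intro h; rw [h] at hdl; simp at hdl
              have := ih (i + 1) pl stack.dropLast (cur ++ [')']) (d - 1) (s : Int) hi1 hlen'
                (by omega) (by rw [List.length_dropLast, hstk]; omega) (fun h => absurd h hlast)
                (by
                  intro _
                  refine ⟨by omega, by simp; omega, ?_⟩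
                  simp only [Int.toNat_natCast]
                  rw [hcur, take_drop_snoc cs s i ')' rest hsle hdrop])
              simpa [stepA, stepAfinish, stepB, hstkne, hc1, hdl, hdlnil, hn, hdpos,
                show ¬ (d - 1 = 0) by omega,
                show 1 < stack.length by rw [hstk]; omega,
                show ¬ (stack.length - 1 = 0) by rw [hstk]; omega] using this
        · by_cases hd0 : d = 0
          · have hstk0 : stack = [] := by
              subst hd0; simpa using List.eq_nil_of_length_eq_zero (by simp [hstk])
            subst hd0
            have := ih (i + 1) pl [] cur 0 start hi1 hlen' le_rfl (by simp)
              (fun _ => rfl) (by intro h; exact absurd h (lt_irrefl 0))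
            simpa [stepA, stepAfinish, stepB, hstk0, hc1, hc2] using this
          · have hdpos : 0 < d := lt_of_le_of_ne hd (Ne.symm hd0)
            obtain ⟨hs0, hsle, hcur⟩ := hinv hdpos
            obtain ⟨s, rfl⟩ : ∃ s : Nat, start = (s : Int) :=
              ⟨start.toNat, (Int.toNat_of_nonneg hs0).symm⟩
            have hstkne : stack ≠ [] := by
              intro h; rw [h] at hstk; simp at hstk; omega
            simp only [Int.toNat_natCast] at hcur hsle
            have := ih (i + 1) pl stack (cur ++ [c]) d (s : Int) hi1 hlen' hd hstk
              (fun h => absurd h hlast)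
              (by
                intro _
                refine ⟨by omega, by simp; omega, ?_⟩
                simp only [Int.toNat_natCast]
                rw [hcur, take_drop_snoc cs s i c rest hsle hdrop])
            simpa [stepA, stepAfinish, stepB, hstkne, hc1, hc2, hn,
              show stack.length > 0 by rw [hstk]; omega] using this

-- ===== VERDICT (by name: the statement is the Claim_ definition above) =====
theorem parse_poses_spec : Claim_equal_parse_poses := by
  intro poses _hdom
  unfold Spec_parse_poses parse_poses parse_poses_alt
  have h := loop_eq poses.toList poses.toList 0 [] [] [] 0 0 (by simp) (by simp)
    (le_refl 0) (by simp) (fun _ => rfl) (by intro h; omega)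
  simp only [Nat.cast_zero] at h
  exact congrArg _ h
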